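-- pv_equiv track=rewrite | github.com/qwrtln/Advent-of-Code | 14.py | tilt_vertical
-- ===== SOURCE A (Python) =====
-- def tilt_vertical(puzzle, north=True):
--     cols = ["".join([r[i] for r in puzzle]) for i in range(len(puzzle[0]))]
--     sorted_cols = []
--     for col in cols:
--         sorted_cols.append(
--             "#".join(["".join(sorted(li, reverse=north)) for li in col.split("#")])
--         )
--     return ["".join([c[i] for c in sorted_cols]) for i in range(len(sorted_cols[0]))]
-- ===== SOURCE B (Python) =====
-- def _emit(counts, north, out):
--     # append the counted characters in sorted order (descending codes when north)
--     codes = range(127, -1, -1) if north else range(128)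
--     for c in codes:
--         out.extend(chr(c) * counts[c])
--
--
-- def tilt_vertical(puzzle, north=True):
--     # Counting pass per column: bucket-count each maximal run between '#' walls
--     # and emit the buckets in code order, instead of comparison-sorting each run.
--     width = len(puzzle[0])
--     cols_out = []
--     for i in range(width):
--         counts = [0] * 128
--         parts = []
--         for row in puzzle:
--             ch = row[i]
--             if ch == "#":
--                 _emit(counts, north, parts)
--                 parts.append("#")
--                 counts = [0] * 128
--             else:
--                 counts[ord(ch)] += 1
--         _emit(counts, north, parts)
--         cols_out.append(parts)
--     return ["".join(col[j] for col in cols_out) for j in range(len(cols_out[0]))]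
-- ===== Notes on version B (the rewrite author's own statement) =====
-- stated objective: alternative
-- what changed: Replaces A's transpose + per-segment comparison sort (split on '#', sorted(), join) by a single counting pass down each column that bucket-counts the characters of each run between '#' walls and emits the buckets in code order (counting sort), with no split/join and no comparison sort.
import Mathlib
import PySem

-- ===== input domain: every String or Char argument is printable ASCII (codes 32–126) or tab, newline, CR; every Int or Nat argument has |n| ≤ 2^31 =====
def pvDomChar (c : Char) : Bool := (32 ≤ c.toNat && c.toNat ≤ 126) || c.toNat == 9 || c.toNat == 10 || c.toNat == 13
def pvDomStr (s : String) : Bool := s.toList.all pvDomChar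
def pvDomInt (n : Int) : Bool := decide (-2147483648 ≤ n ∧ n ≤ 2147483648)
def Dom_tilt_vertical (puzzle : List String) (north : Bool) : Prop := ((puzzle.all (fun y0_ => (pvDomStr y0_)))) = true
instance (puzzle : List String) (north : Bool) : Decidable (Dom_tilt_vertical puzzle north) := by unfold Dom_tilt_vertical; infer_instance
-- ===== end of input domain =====

-- B replaces A's per-segment comparison sort (split on '#', sorted, join) by a single
-- counting pass down each column (bucket counts emitted in code order): an alternative
-- algorithm of the same cost; equivalence is proved on Pre_ (inputs where A returns).

-- ===== PORT A =====
-- literal port of A: transpose to columns, per column split on '#', sort each segment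
-- (reverse = north), join with '#', transpose back.  r[i] is ported as r.getD i ' ':
-- Pre_ guarantees i < len r, where getD equals Python's r[i].
def tilt_vertical (puzzle : List String) (north : Bool) : List String :=
  let rows := puzzle.map String.toList
  let cols := (List.range (rows.headD []).length).map (fun i => rows.map (fun r => r.getD i ' '))
  let sorted_cols := cols.map (fun col =>
    PySem.Chars.join ['#'] ((PySem.Chars.splitOn col ['#']).map
      (fun li => PySem.List.sorted li (fun x => x) north)))
  (List.range (sorted_cols.headD []).length).map
    (fun i => String.ofList (sorted_cols.map (fun c => c.getD i ' ')))

-- ===== PORT B =====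
-- counts[ord(ch)] += 1
def pvStep (cs : List Nat) (c : Char) : List Nat := cs.set c.toNat (cs.getD c.toNat 0 + 1)

-- _emit: the counted characters in code order (descending codes when north)
def pvEmit (counts : List Nat) (north : Bool) : List Char :=
  (if north then (List.range 128).reverse else List.range 128).flatMap
    (fun c => List.replicate (counts.getD c 0) (Char.ofNat c))

-- the inner loop over the rows of one column (counts, parts are the loop state)
def pvTiltColGo (north : Bool) : List Char → List Nat → List Char → List Char
  | [], counts, parts => parts ++ pvEmit counts north
  | c :: rest, counts, parts =>
    if c = '#' then
      pvTiltColGo north rest (List.replicate 128 0) ((parts ++ pvEmit counts north) ++ ['#'])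
    else
      pvTiltColGo north rest (pvStep counts c) parts

def tilt_vertical_alt (puzzle : List String) (north : Bool) : List String :=
  let rows := puzzle.map String.toList
  let colsOut := (List.range (rows.headD []).length).map
    (fun i => pvTiltColGo north (rows.map (fun r => r.getD i ' ')) (List.replicate 128 0) [])
  (List.range (colsOut.headD []).length).map
    (fun j => String.ofList (colsOut.map (fun c => c.getD j ' ')))

-- ===== PRECONDITION & SPEC =====
-- Pre_ excludes exactly the inputs on which Python A raises IndexError: an empty puzzle
-- (puzzle[0]), an empty first row (sorted_cols[0]), or a row shorter than the first row (r[i]).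
def Pre_tilt_vertical (puzzle : List String) (north : Bool) : Prop :=
  puzzle ≠ [] ∧ 0 < (puzzle.headD "").toList.length ∧
    ∀ r ∈ puzzle, (puzzle.headD "").toList.length ≤ r.toList.length
instance (puzzle : List String) (north : Bool) : Decidable (Pre_tilt_vertical puzzle north) := by
  unfold Pre_tilt_vertical; infer_instance

def pvWitness_tilt_vertical : List String × Bool := (["O#.", ".O.", "..O"], true)

def Spec_tilt_vertical (puzzle : List String) (north : Bool) (out : List String) : Prop :=
  out = tilt_vertical_alt puzzle north
instance (puzzle : List String) (north : Bool) (out : List String) : Decidable (Spec_tilt_vertical puzzle north out) := by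
  unfold Spec_tilt_vertical; infer_instance

-- ===== CLAIM (what is proved, stated in full; the proofs are below) =====
def Claim_equal_tilt_vertical : Prop := ∀ (puzzle : List String) (north : Bool), Dom_tilt_vertical puzzle north → Pre_tilt_vertical puzzle north → Spec_tilt_vertical puzzle north (tilt_vertical puzzle north)

-- ===== LEMMAS AND PROOFS =====

theorem pvToNat_ofNat (n : Nat) (h : n < 128) : (Char.ofNat n).toNat = n := by
  have hv : Nat.isValidChar n := Or.inl (by omega)
  rw [Char.ofNat, dif_pos hv]
  show (UInt32.ofNatLT n _).toNat = n
  exact UInt32.toNat_ofNatLT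
theorem pvChar_le (a b : Char) : a ≤ b ↔ a.toNat ≤ b.toNat := by
  rw [Char.le_def]; rfl
theorem pvChar_eq (a b : Char) : a = b ↔ a.toNat = b.toNat := by
  constructor
  · rintro rfl; rfl
  · intro h; exact Char.ext (by exact UInt32.toNat_inj.mp h)

theorem pvGetD_step (cs : List Nat) (c : Char) (k : Nat) (hc : c.toNat < cs.length) :
    (pvStep cs c).getD k 0 = if c.toNat = k then cs.getD k 0 + 1 else cs.getD k 0 := by
  by_cases h : c.toNat = k
  · subst h; rw [if_pos rfl]
    simp [pvStep, List.getD, hc]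
  · rw [if_neg h]
    simp [pvStep, List.getD, List.getElem?_set_ne h]

theorem pvGetD_foldl_step (l : List Char) (cs : List Nat) (hcs : cs.length = 128)
    (hl : ∀ c ∈ l, c.toNat < 128) (k : Nat) (hk : k < 128) :
    (List.foldl pvStep cs l).getD k 0 = cs.getD k 0 + l.countP (fun c => c.toNat == k) := by
  induction l generalizing cs with
  | nil => simp
  | cons c t ih =>
    rw [List.foldl_cons, ih _ (by simp [pvStep, hcs]) (fun c hc => hl c (List.mem_cons_of_mem _ hc))]
    rw [pvGetD_step cs c k (by rw [hcs]; exact hl c (List.mem_cons_self))]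
    rw [List.countP_cons]
    by_cases h : c.toNat = k <;> simp [h] <;> omega

theorem pvCount_emit (codes : List Nat) (f : Nat → Nat) (x : Char)
    (hnd : codes.Nodup) (hb : ∀ k ∈ codes, k < 128) :
    (codes.flatMap (fun k => List.replicate (f k) (Char.ofNat k))).count x =
      if x.toNat ∈ codes then f x.toNat else 0 := by
  induction codes with
  | nil => simp
  | cons k t ih =>
    rw [List.flatMap_cons, List.count_append, List.count_replicate,
      ih hnd.of_cons (fun k hk => hb k (List.mem_cons_of_mem _ hk))]
    have hk128 : k < 128 := hb k List.mem_cons_self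
    by_cases h : Char.ofNat k = x
    · have hxk : x.toNat = k := by rw [← h, pvToNat_ofNat k hk128]
      have hxt : x.toNat ∉ t := by rw [hxk]; exact (List.nodup_cons.mp hnd).1
      rw [if_pos (show (Char.ofNat k == x) = true from beq_iff_eq.mpr h), if_neg hxt, hxk]
      simp
    · have hxk : x.toNat ≠ k := by
        intro hh
        exact h ((pvChar_eq _ _).mpr (by rw [pvToNat_ofNat k hk128, hh]))
      simp [h, hxk, List.mem_cons]

theorem pvEmit_perm (north : Bool) (l : List Char) (hl : ∀ c ∈ l, c.toNat < 128) :
    (pvEmit (List.foldl pvStep (List.replicate 128 0) l) north).Perm l := by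
  rw [List.perm_iff_count]
  intro x
  have hnd : (if north then (List.range 128).reverse else List.range 128).Nodup := by
    cases north <;> simp [List.nodup_range]
  have hb : ∀ k ∈ (if north then (List.range 128).reverse else List.range 128), k < 128 := by
    cases north <;> simp
  rw [pvEmit, pvCount_emit _ _ x hnd hb]
  have hmemiff : (x.toNat ∈ (if north then (List.range 128).reverse else List.range 128)) ↔ x.toNat < 128 := by
    cases north <;> simp
  by_cases hx : x.toNat < 128
  · rw [if_pos (hmemiff.mpr hx)]
    rw [pvGetD_foldl_step l _ (by simp) hl x.toNat hx]
    have h0 : (List.replicate 128 (0:Nat)).getD x.toNat 0 = 0 := by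
      simp only [List.getD, List.getElem?_replicate, if_pos hx, Option.getD_some]
    rw [h0, Nat.zero_add]
    rw [List.count_eq_countP]
    apply List.countP_congr
    intro c _
    simp [pvChar_eq c x]
  · rw [if_neg (fun hh => hx (hmemiff.mp hh))]
    symm
    rw [List.count_eq_zero]
    intro hmem
    exact hx (hl x hmem)

theorem pvEmit_pairwise (codes : List Nat) (f : Nat → Nat) (r : Char → Char → Prop)
    (hrefl : ∀ x, r x x)
    (h : codes.Pairwise (fun a b => r (Char.ofNat a) (Char.ofNat b))) :
    (codes.flatMap (fun k => List.replicate (f k) (Char.ofNat k))).Pairwise r := by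
  induction codes with
  | nil => simp
  | cons k t ih =>
    rw [List.flatMap_cons, List.pairwise_append]
    refine ⟨List.pairwise_replicate.mpr (Or.inr (hrefl _)), ih h.of_cons, ?_⟩
    intro a ha b hb
    rw [List.eq_of_mem_replicate ha]
    rw [List.mem_flatMap] at hb
    obtain ⟨k', hk', hbk'⟩ := hb
    rw [List.eq_of_mem_replicate hbk']
    exact (List.pairwise_cons.mp h).1 k' hk'

theorem pvEmit_eq_sorted (north : Bool) (l : List Char) (hl : ∀ c ∈ l, c.toNat < 128) :
    pvEmit (List.foldl pvStep (List.replicate 128 0) l) north =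
      PySem.List.sorted l (fun x => x) north := by
  have hperm : (pvEmit (List.foldl pvStep (List.replicate 128 0) l) north).Perm
      (PySem.List.sorted l (fun x => x) north) :=
    (pvEmit_perm north l hl).trans (PySem.List.sorted_perm l _ north).symm
  cases north with
  | false =>
    refine List.Perm.eq_of_pairwise (fun a b _ _ h1 h2 => le_antisymm h1 h2) ?_ ?_ hperm
    · rw [pvEmit, if_neg (by simp)]
      apply pvEmit_pairwise _ _ _ le_refl
      apply (List.pairwise_lt_range).imp_of_mem
      intro a b ha hb hab
      rw [pvChar_le, pvToNat_ofNat a (List.mem_range.mp ha), pvToNat_ofNat b (List.mem_range.mp hb)]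
      omega
    · exact PySem.List.sorted_pairwise l (fun x => x)
  | true =>
    refine List.Perm.eq_of_pairwise (le := fun a b => b ≤ a) (fun a b _ _ h1 h2 => le_antisymm h2 h1) ?_ ?_ hperm
    · rw [pvEmit, if_pos rfl]
      apply pvEmit_pairwise _ _ (fun a b => b ≤ a) (fun x => le_refl x)
      rw [List.pairwise_reverse]
      apply (List.pairwise_lt_range).imp_of_mem
      intro a b ha hb hab
      rw [pvChar_le, pvToNat_ofNat a (List.mem_range.mp ha), pvToNat_ofNat b (List.mem_range.mp hb)]
      omega
    · exact PySem.List.sorted_pairwise_rev l (fun x => x)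

def pvSplitA : List Char → List Char × List (List Char)
  | [] => ([], [])
  | c :: t =>
    let p := pvSplitA t
    if c = '#' then ([], p.1 :: p.2) else (c :: p.1, p.2)

theorem pvSplitOn_go_spec (fuel : Nat) (l cur : List Char) (acc : List (List Char))
    (h : l.length < fuel) :
    PySem.Chars.splitOn.go ['#'] fuel l cur acc =
      acc.reverse ++ (((pvSplitA l).1 :: (pvSplitA l).2).modifyHead (cur.reverse ++ ·)) := by
  induction fuel generalizing l cur acc with
  | zero => omega
  | succ f ih =>
    cases l with
    | nil => simp [PySem.Chars.splitOn.go, pvSplitA]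
    | cons c rest =>
      rw [PySem.Chars.splitOn.go]
      by_cases hc : c = '#'
      · subst hc
        simp only [List.isPrefixOf, BEq.rfl, Bool.true_and, if_pos]
        rw [ih _ _ _ (by simpa using Nat.lt_of_succ_lt_succ h)]
        simp [pvSplitA]
      · have : (['#'].isPrefixOf (c :: rest)) = false := by
          simp [List.isPrefixOf]; exact fun hh => (hc (by exact hh.symm ▸ rfl)).elim
        rw [if_neg (by simp [this])]
        rw [ih _ _ _ (by simpa using Nat.lt_of_succ_lt_succ h)]
        simp only [pvSplitA, if_neg hc]
        cases hsp : pvSplitA rest with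
        | mk h1 h2 => simp [List.modifyHead]

theorem pvSplitOn_eq (l : List Char) :
    PySem.Chars.splitOn l ['#'] = (pvSplitA l).1 :: (pvSplitA l).2 := by
  rw [PySem.Chars.splitOn, pvSplitOn_go_spec _ _ _ _ (by omega)]
  cases hsp : pvSplitA l with
  | mk a b => simp [List.modifyHead]

theorem pvGo_parts (north : Bool) (col : List Char) (counts : List Nat) (parts : List Char) :
    pvTiltColGo north col counts parts = parts ++ pvTiltColGo north col counts [] := by
  induction col generalizing counts parts with
  | nil => simp [pvTiltColGo]
  | cons c rest ih =>
    by_cases hc : c = '#'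
    · simp only [pvTiltColGo, if_pos hc]
      rw [ih, ih (List.replicate 128 0) (([] ++ pvEmit counts north) ++ ['#'])]
      simp
    · simp only [pvTiltColGo, if_neg hc]
      exact ih _ _

theorem pvGo_spec (north : Bool) (col : List Char) (counts : List Nat) :
    pvTiltColGo north col counts [] =
      pvEmit (List.foldl pvStep counts (pvSplitA col).1) north ++
        ((pvSplitA col).2).flatMap
          (fun t => '#' :: pvEmit (List.foldl pvStep (List.replicate 128 0) t) north) := by
  induction col generalizing counts with
  | nil => simp [pvTiltColGo, pvSplitA]
  | cons c rest ih =>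
    by_cases hc : c = '#'
    · subst hc
      simp only [pvTiltColGo]
      rw [pvGo_parts, ih]
      simp [pvSplitA]
    · simp only [pvTiltColGo, if_neg hc]
      rw [ih]
      simp [pvSplitA, if_neg hc]


theorem pvSplitA_mem (col : List Char) :
    (∀ c ∈ (pvSplitA col).1, c ∈ col) ∧
      (∀ t ∈ (pvSplitA col).2, ∀ c ∈ t, c ∈ col) := by
  induction col with
  | nil => simp [pvSplitA]
  | cons c rest ih =>
    by_cases hc : c = '#'
    · simp only [pvSplitA, if_pos hc]
      refine ⟨by simp, ?_⟩
      intro t ht c' hc'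
      rcases List.mem_cons.mp ht with h | h
      · exact List.mem_cons_of_mem _ (ih.1 c' (h ▸ hc'))
      · exact List.mem_cons_of_mem _ (ih.2 t h c' hc')
    · simp only [pvSplitA, if_neg hc]
      constructor
      · intro c' hc'
        rcases List.mem_cons.mp hc' with h | h
        · exact h ▸ List.mem_cons_self
        · exact List.mem_cons_of_mem _ (ih.1 c' h)
      · intro t ht c' hc'
        exact List.mem_cons_of_mem _ (ih.2 t ht c' hc')

theorem pvJoin_cons (s : List Char) (ss : List (List Char)) :
    PySem.Chars.join ['#'] (s :: ss) = s ++ ss.flatMap (fun t => '#' :: t) := by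
  induction ss generalizing s with
  | nil => simp [PySem.Chars.join_singleton]
  | cons t ts ih =>
    rw [PySem.Chars.join_cons_cons, ih]
    simp

theorem pvFlatMap_emit (north : Bool) (ts : List (List Char))
    (h : ∀ t ∈ ts, ∀ c ∈ t, c.toNat < 128) :
    ts.flatMap (fun t => '#' :: pvEmit (List.foldl pvStep (List.replicate 128 0) t) north) =
      (ts.map (fun li => PySem.List.sorted li (fun x => x) north)).flatMap
        (fun t => '#' :: t) := by
  induction ts with
  | nil => simp
  | cons t ts ih =>
    rw [List.flatMap_cons, List.map_cons, List.flatMap_cons]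
    rw [pvEmit_eq_sorted north t (h t List.mem_cons_self),
      ih (fun t' ht' => h t' (List.mem_cons_of_mem _ ht'))]

theorem pvCol_eq (north : Bool) (col : List Char) (hl : ∀ c ∈ col, c.toNat < 128) :
    pvTiltColGo north col (List.replicate 128 0) [] =
      PySem.Chars.join ['#'] ((PySem.Chars.splitOn col ['#']).map
        (fun li => PySem.List.sorted li (fun x => x) north)) := by
  rw [pvGo_spec, pvSplitOn_eq, List.map_cons, pvJoin_cons]
  rw [pvEmit_eq_sorted north _ (fun c hc => hl c ((pvSplitA_mem col).1 c hc))]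
  congr 1
  exact pvFlatMap_emit north (pvSplitA col).2
    (fun t ht c hc => hl c ((pvSplitA_mem col).2 t ht c hc))

theorem pvChars_lt (puzzle : List String) (hdom : Dom_tilt_vertical puzzle true) (i : Nat) :
    ∀ c ∈ (puzzle.map String.toList).map (fun r => r.getD i ' '), c.toNat < 128 := by
  intro c hc
  obtain ⟨r, hr, rfl⟩ := List.mem_map.mp hc
  obtain ⟨p, hp, rfl⟩ := List.mem_map.mp hr
  rw [List.getD]
  cases h : p.toList[i]? with
  | none => simp
  | some x =>
    simp only [Option.getD_some]
    have hx : x ∈ p.toList := List.mem_of_getElem? h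
    have hd : pvDomStr p = true := by
      have := List.all_eq_true.mp hdom p hp
      simpa using this
    have hcx : pvDomChar x = true := List.all_eq_true.mp hd x hx
    unfold pvDomChar at hcx
    simp only [Bool.or_eq_true, Bool.and_eq_true, decide_eq_true_eq, beq_iff_eq] at hcx
    omega

theorem tilt_vertical_spec : Claim_equal_tilt_vertical := by
  intro puzzle north hdom _hpre
  have hdom' : Dom_tilt_vertical puzzle true := hdom
  unfold Spec_tilt_vertical tilt_vertical tilt_vertical_alt
  dsimp only
  rw [List.map_congr_left (fun i _ => pvCol_eq north
    ((puzzle.map String.toList).map (fun r => r.getD i ' ')) (pvChars_lt puzzle hdom' i))]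
  simp only [List.map_map]
  rfl
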